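-- pv_equiv track=rewrite | github.com/heitzes/BOJ | 백준/Gold/3687. 성냥개비/성냥개비.py | mini2
-- ===== SOURCE A (Python) =====
-- def mini2(n):
--     num = 0
--     seven = n // 7
--     rem = n % 7
--     if rem == 1:
--         num += 10**(seven)
--         seven -= 1
--         for i in range(seven):
--             num += 10**i*8
--     else:
--         num += 10**(seven)*6
--         for i in range(seven):
--             num += 10**i*8
--     return num
-- ===== SOURCE B (Python) =====
-- def mini2(n):
--     seven, rem = divmod(n, 7)
--     if rem == 1:
--         k = seven - 1
--         return 10**seven + (8 * (10**k - 1) // 9 if k > 0 else 0)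
--     return 6 * 10**seven + (8 * (10**seven - 1) // 9 if seven > 0 else 0)
-- ===== Notes on version B (the rewrite author's own statement) =====
-- stated objective: faster
-- what changed: The per-digit loop that appends 8s one power of ten at a time is replaced by the closed-form repunit sum 8*(10**k - 1)//9, computed in a single arithmetic expression.
-- outside the precondition, e.g. on mini2(-1): A returns 0.6000000000000001, B returns 0.6000000000000001
import Mathlib
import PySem

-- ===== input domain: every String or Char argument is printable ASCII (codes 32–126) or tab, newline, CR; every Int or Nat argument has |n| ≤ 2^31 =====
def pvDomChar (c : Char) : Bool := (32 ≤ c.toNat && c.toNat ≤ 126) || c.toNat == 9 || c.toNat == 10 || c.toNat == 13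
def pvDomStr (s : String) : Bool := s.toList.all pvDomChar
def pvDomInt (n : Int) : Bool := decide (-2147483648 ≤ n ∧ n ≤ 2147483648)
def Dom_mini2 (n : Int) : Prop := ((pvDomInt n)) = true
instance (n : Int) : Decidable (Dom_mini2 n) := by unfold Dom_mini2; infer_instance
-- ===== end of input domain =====

-- B replaces A's per-digit loop by the closed-form repunit sum 8*(10^k - 1)//9 (objective: faster).

-- ===== PORT A =====
def mini2 (n : Int) : Int :=
  let num : Int := 0
  let seven := PySem.Int.floordiv n 7
  let rem := PySem.Int.mod n 7
  if rem == 1 then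
    let num := num + 10 ^ seven.toNat       -- 10**seven; exponent is nonneg under Pre_
    let seven := seven - 1
    (PySem.List.pyRange 0 seven 1).foldl (fun num i => num + 10 ^ i.toNat * 8) num
  else
    let num := num + 10 ^ seven.toNat * 6
    (PySem.List.pyRange 0 seven 1).foldl (fun num i => num + 10 ^ i.toNat * 8) num

-- ===== PORT B =====
def mini2_alt (n : Int) : Int :=
  let seven := PySem.Int.floordiv n 7
  let rem := PySem.Int.mod n 7
  if rem == 1 then
    let k := seven - 1
    10 ^ seven.toNat + (if k > 0 then PySem.Int.floordiv (8 * (10 ^ k.toNat - 1)) 9 else 0)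
  else
    6 * 10 ^ seven.toNat + (if seven > 0 then PySem.Int.floordiv (8 * (10 ^ seven.toNat - 1)) 9 else 0)

-- ===== PRECONDITION & SPEC =====
-- Pre_ excludes n < 0, where the Python A evaluates 10**(negative) and returns a float, not an int.
def Pre_mini2 (n : Int) : Prop := 0 ≤ n
instance (n : Int) : Decidable (Pre_mini2 n) := by unfold Pre_mini2; infer_instance
def pvWitness_mini2 : Int := 15

def Spec_mini2 (n : Int) (out : Int) : Prop := out = mini2_alt n
instance (n : Int) (out : Int) : Decidable (Spec_mini2 n out) := by unfold Spec_mini2; infer_instance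

-- ===== CLAIM (what is proved, stated in full; the proofs are below) =====
def Claim_equal_mini2 : Prop := ∀ (n : Int), Dom_mini2 n → Pre_mini2 n → Spec_mini2 n (mini2 n)

-- ===== LEMMAS AND PROOFS =====

lemma nine_dvd_pow_sub_one (k : Nat) : (9 : Int) ∣ 10 ^ k - 1 := by
  have h := sub_dvd_pow_sub_pow (10 : Int) 1 k
  simpa using h

-- the repunit loop in closed form
lemma repunit_foldl (k : Nat) (s : Int) :
    (PySem.List.pyRange 0 (k : Int) 1).foldl (fun num i => num + 10 ^ i.toNat * 8) s
      = s + 8 * ((10 : Int) ^ k - 1) / 9 := by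
  induction k generalizing s with
  | zero => simp [PySem.List.pyRange_one_eq_nil]
  | succ m ih =>
    have hsplit : PySem.List.pyRange 0 ((m : Int) + 1) 1
        = PySem.List.pyRange 0 (m : Int) 1 ++ [(m : Int)] := by
      exact PySem.List.pyRange_one_succ_right (by positivity)
    have hcast : ((m : Int) + 1) = ((m + 1 : Nat) : Int) := by push_cast; ring
    rw [← hcast, hsplit, List.foldl_append, ih]
    obtain ⟨c, hc⟩ := nine_dvd_pow_sub_one m
    have h1 : (8 : Int) * (10 ^ m - 1) / 9 = 8 * c := by
      rw [hc, show (9 : Int) * c = c * 9 by ring, ← mul_assoc,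
        Int.mul_ediv_cancel _ (by norm_num)]
    have h2 : (8 : Int) * (10 ^ (m + 1) - 1) / 9 = 8 * (10 * c + 1) := by
      have : (10 : Int) ^ (m + 1) - 1 = 9 * (10 * c + 1) := by
        have h10 : (10 : Int) ^ m = 9 * c + 1 := by omega
        rw [pow_succ]; rw [h10]; ring
      rw [this, show (9 : Int) * (10 * c + 1) = (10 * c + 1) * 9 by ring, ← mul_assoc,
        Int.mul_ediv_cancel _ (by norm_num)]
    have h10 : (10 : Int) ^ m = 9 * c + 1 := by omega
    simp only [List.foldl_cons, List.foldl_nil, h1, h2, Int.toNat_natCast]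
    rw [h10]; ring

theorem mini2_spec : Claim_equal_mini2 := by
  intro n _ hpre
  unfold Spec_mini2 mini2 mini2_alt
  have h7 : (0 : Int) < 7 := by norm_num
  set s := PySem.Int.floordiv n 7 with hs
  have hs0 : 0 ≤ s := by
    rw [hs, PySem.Int.floordiv_eq_ediv_of_pos h7]
    exact Int.ediv_nonneg hpre (by norm_num)
  obtain ⟨t, ht⟩ := Int.eq_ofNat_of_zero_le hs0
  by_cases hrem : PySem.Int.mod n 7 == 1
  · simp only [hrem, if_true]
    cases t with
    | zero =>
      simp only [ht]
      norm_num [PySem.List.pyRange_one_eq_nil]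
    | succ u =>
      have hb : s - 1 = ((u : Nat) : Int) := by omega
      rw [hb, repunit_foldl]
      have hdvd := nine_dvd_pow_sub_one u
      rcases Nat.eq_zero_or_pos u with hu | hu
      · subst hu; simp
      · have : ((u : Nat) : Int) > 0 := by exact_mod_cast hu
        rw [if_pos this, PySem.Int.floordiv_eq_ediv_of_pos (by norm_num)]
        simp [Int.toNat_natCast]
  · simp only [hrem, if_false, Bool.false_eq_true]
    rw [ht, repunit_foldl]
    rcases Nat.eq_zero_or_pos t with hu | hu
    · subst hu; simp
    · have : ((t : Nat) : Int) > 0 := by exact_mod_cast hu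
      rw [if_pos this, PySem.Int.floordiv_eq_ediv_of_pos (by norm_num)]
      simp [Int.toNat_natCast]
      ring
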